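-- pv_equiv track=rewrite | github.com/ecalifornica/CutePetsSF | cuties.py | age_parse
-- ===== SOURCE A (Python) =====
-- def age_parse(age):
--     quantity = ''
--
--     for i in age:
--         if i == 'Y':
--             scale = 'year'
--             break
--         elif i == 'M':
--             scale = 'month'
--             break
--         if i.isdigit:
--             quantity += i
--
--     if quantity == '1':
--         age_string = 'a {}'.format(scale)
--     elif quantity in ('8', '11'):
--         age_string = 'an {} {}'.format(quantity, scale)
--     else:
--         age_string = 'a {} {}'.format(quantity, scale)
--
--     return age_string
-- ===== SOURCE B (Python) =====
-- def age_parse(age):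
--     # find the first unit marker; raises StopIteration when absent (A raises NameError there)
--     idx = next(i for i, c in enumerate(age) if c in 'YM')
--     scale = 'year' if age[idx] == 'Y' else 'month'
--     quantity = age[:idx]
--     if quantity == '1':
--         return 'a ' + scale
--     return ('an ' if quantity in ('8', '11') else 'a ') + quantity + ' ' + scale
-- ===== Notes on version B (the rewrite author's own statement) =====
-- stated objective: simpler
-- what changed: B locates the first 'Y'/'M' marker by index and takes the whole prefix as one slice, replacing A's character-by-character accumulator loop with break; the article choice collapses into one expression.
import Mathlib
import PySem

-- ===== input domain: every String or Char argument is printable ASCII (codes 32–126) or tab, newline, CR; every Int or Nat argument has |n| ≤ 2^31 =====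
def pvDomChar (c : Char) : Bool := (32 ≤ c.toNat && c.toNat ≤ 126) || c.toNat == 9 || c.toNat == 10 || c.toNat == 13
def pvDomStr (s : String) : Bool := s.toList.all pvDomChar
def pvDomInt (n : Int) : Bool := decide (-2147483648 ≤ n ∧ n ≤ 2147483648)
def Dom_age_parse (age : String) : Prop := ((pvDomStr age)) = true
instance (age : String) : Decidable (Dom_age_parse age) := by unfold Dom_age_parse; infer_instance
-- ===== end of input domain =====

-- B replaces A's char-by-char accumulator loop with a find-index + one prefix slice (objective: simpler).

-- ===== PORT A =====
-- A's for-loop with break: accumulates every pre-marker char (i.isdigit is always truthy),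
-- returns (quantity, scale); scale = none means Python's 'scale' stayed unbound (UnboundLocalError).
def ageLoopA : List Char → String → String × Option String
  | [], q => (q, none)
  | c :: rest, q =>
    if c = 'Y' then (q, some "year")
    else if c = 'M' then (q, some "month")
    else ageLoopA rest (q.push c)

def age_parse (age : String) : String :=
  let r := ageLoopA age.toList ""
  let quantity := r.1
  let scale := r.2.getD ""   -- none only outside Pre_ (Python raises there)
  if quantity = "1" then "a " ++ scale
  else if quantity = "8" ∨ quantity = "11" then "an " ++ quantity ++ " " ++ scale
  else "a " ++ quantity ++ " " ++ scale

-- ===== PORT B =====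
def age_parse_alt (age : String) : String :=
  let cs := age.toList
  match cs.findIdx? (fun c => c = 'Y' || c = 'M') with
  | none => ""   -- Python B raises StopIteration here; excluded by Pre_
  | some idx =>
    let scale := if cs.getD idx ' ' = 'Y' then "year" else "month"
    let quantity := String.ofList (cs.take idx)
    if quantity = "1" then "a " ++ scale
    else (if quantity = "8" ∨ quantity = "11" then "an " else "a ") ++ quantity ++ " " ++ scale

-- ===== PRECONDITION & SPEC =====
-- Pre_ excludes strings with no 'Y' and no 'M': there A raises UnboundLocalError (and B StopIteration).
def Pre_age_parse (age : String) : Prop := 'Y' ∈ age.toList ∨ 'M' ∈ age.toList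
instance (age : String) : Decidable (Pre_age_parse age) := by unfold Pre_age_parse; infer_instance
def pvWitness_age_parse : String := "8M"

def Spec_age_parse (age : String) (out : String) : Prop := out = age_parse_alt age
instance (age : String) (out : String) : Decidable (Spec_age_parse age out) := by unfold Spec_age_parse; infer_instance

-- ===== CLAIM (what is proved, stated in full; the proofs are below) =====
def Claim_equal_age_parse : Prop := ∀ (age : String), Dom_age_parse age → Pre_age_parse age → Spec_age_parse age (age_parse age)

-- ===== LEMMAS AND PROOFS =====

-- A's loop, on a list whose first marker is at idx, yields the full prefix and the marker's scale.
theorem ageLoopA_eq_findIdx (cs : List Char) (q : String) (idx : Nat)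
    (h : cs.findIdx? (fun c => c = 'Y' || c = 'M') = some idx) :
    ageLoopA cs q = (q ++ String.ofList (cs.take idx),
      some (if cs.getD idx ' ' = 'Y' then "year" else "month")) := by
  induction cs generalizing q idx with
  | nil => simp at h
  | cons c rest ih =>
    rw [List.findIdx?_cons] at h
    by_cases hY : c = 'Y'
    · subst hY
      simp at h
      subst h
      simp [ageLoopA]
    · by_cases hM : c = 'M'
      · subst hM
        simp at h
        subst h
        simp [ageLoopA, hY]
      · simp [hY, hM, Option.map_eq_some_iff] at h
        obtain ⟨j, hj, rfl⟩ := h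
        rw [ageLoopA, if_neg hY, if_neg hM, ih (q.push c) j hj]
        refine Prod.ext ?_ (by simp)
        apply String.toList_inj.mp
        simp

theorem findIdx?_isSome_of_pre (age : String) (h : Pre_age_parse age) :
    (age.toList.findIdx? (fun c => c = 'Y' || c = 'M')).isSome := by
  rw [List.findIdx?_isSome]
  rcases h with h | h
  · exact List.any_eq_true.mpr ⟨'Y', h, by simp⟩
  · exact List.any_eq_true.mpr ⟨'M', h, by simp⟩

-- ===== VERDICT (by name: the statement is the Claim_ definition above) =====
theorem age_parse_spec : Claim_equal_age_parse := by
  intro age _ hpre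
  unfold Spec_age_parse age_parse age_parse_alt
  obtain ⟨idx, hidx⟩ := Option.isSome_iff_exists.mp (findIdx?_isSome_of_pre age hpre)
  simp only [hidx, ageLoopA_eq_findIdx age.toList "" idx hidx]
  simp only [Option.getD_some, String.empty_append]
  split_ifs <;> rfl
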